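-- pv_equiv track=rewrite | github.com/EgeEken/PBC | PBC2_3.py | process_quadrant_bits
-- ===== SOURCE A (Python) =====
-- def process_quadrant_bits(height, width, size, quadrant_bits, quadrant_padding=0):
--     # for each bit, alternate between vertical and horizontal split, for example
--     # "0", length 1 means vertical split, 0 is left half, 1 is right half
--     # "10", length 2 means vertical first, then horizontal split, 1 is right half, then 0 is top half giving top-right quadrant
--     # "111", length 3 means vertical, horizontal, vertical splits, 1 is right half, then 1 is bottom half, then 1 is right half again giving right quadrant of bottom-right quadrant
--     split_height = True
--
--     row_start, row_end = 0, height
--     col_start, col_end = 0, width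
--
--     for bit in quadrant_bits:
--         if split_height:
--             mid = (row_start + row_end) // 2
--             if bit == '0':
--                 row_end = mid
--             else:
--                 row_start = mid
--         else:
--             mid = (col_start + col_end) // 2
--             if bit == '0':
--                 col_end = mid
--             else:
--                 col_start = mid
--         split_height = not split_height
--
--     row_end -= size
--     col_end -= size
--
--     # Apply padding
--     row_start = max(0, row_start - quadrant_padding)
--     col_start = max(0, col_start - quadrant_padding)
--     row_end = min(height - size, row_end + quadrant_padding)
--     col_end = min(width - size, col_end + quadrant_padding)
--
--     return row_start, col_start, row_end, col_end
-- ===== SOURCE B (Python) =====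
-- def process_quadrant_bits(height, width, size, quadrant_bits, quadrant_padding=0):
--     def narrow(lo, hi, bits):
--         for bit in bits:
--             mid = (lo + hi) // 2
--             if bit == '0':
--                 hi = mid
--             else:
--                 lo = mid
--         return lo, hi
--
--     # even-indexed bits narrow rows, odd-indexed bits narrow columns
--     row_start, row_end = narrow(0, height, quadrant_bits[0::2])
--     col_start, col_end = narrow(0, width, quadrant_bits[1::2])
--
--     row_end -= size
--     col_end -= size
--
--     return (max(0, row_start - quadrant_padding),
--             max(0, col_start - quadrant_padding),
--             min(height - size, row_end + quadrant_padding),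
--             min(width - size, col_end + quadrant_padding))
-- ===== Notes on version B (the rewrite author's own statement) =====
-- stated objective: simpler
-- what changed: Replaces the single interleaved loop with a boolean toggle by two independent passes of one shared narrowing helper over the even-indexed and odd-indexed bit slices.
import Mathlib
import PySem

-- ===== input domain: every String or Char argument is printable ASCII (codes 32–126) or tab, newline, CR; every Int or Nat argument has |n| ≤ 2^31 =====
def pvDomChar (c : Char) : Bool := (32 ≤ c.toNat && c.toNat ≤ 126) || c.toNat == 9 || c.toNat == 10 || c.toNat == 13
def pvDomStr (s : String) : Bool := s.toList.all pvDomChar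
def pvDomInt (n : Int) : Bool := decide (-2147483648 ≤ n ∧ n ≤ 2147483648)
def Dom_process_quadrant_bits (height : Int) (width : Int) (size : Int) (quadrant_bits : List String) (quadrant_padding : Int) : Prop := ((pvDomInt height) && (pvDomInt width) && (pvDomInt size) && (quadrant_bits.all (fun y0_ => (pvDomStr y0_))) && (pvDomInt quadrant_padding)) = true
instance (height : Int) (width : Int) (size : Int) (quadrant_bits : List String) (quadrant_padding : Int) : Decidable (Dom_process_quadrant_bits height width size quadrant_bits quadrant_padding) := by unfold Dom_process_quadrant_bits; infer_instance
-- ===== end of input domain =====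

-- B replaces A's single toggle-driven loop by two independent narrowing passes over the even- and odd-indexed bit slices (simpler decomposition, same cost).


-- ===== PORT A =====
def pqbStep (st : Bool × Int × Int × Int × Int) (bit : String) : Bool × Int × Int × Int × Int :=
  match st with
  | (split_height, row_start, row_end, col_start, col_end) =>
    if split_height then
      let mid := PySem.Int.floordiv (row_start + row_end) 2
      if bit == "0" then (!split_height, row_start, mid, col_start, col_end)
      else (!split_height, mid, row_end, col_start, col_end)
    else
      let mid := PySem.Int.floordiv (col_start + col_end) 2
      if bit == "0" then (!split_height, row_start, row_end, col_start, mid)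
      else (!split_height, row_start, row_end, mid, col_end)

def process_quadrant_bits (height : Int) (width : Int) (size : Int) (quadrant_bits : List String) (quadrant_padding : Int) : Int × Int × Int × Int :=
  match quadrant_bits.foldl pqbStep (true, 0, height, 0, width) with
  | (_, row_start, row_end, col_start, col_end) =>
    let row_end := row_end - size
    let col_end := col_end - size
    (max 0 (row_start - quadrant_padding), max 0 (col_start - quadrant_padding),
     min (height - size) (row_end + quadrant_padding), min (width - size) (col_end + quadrant_padding))

-- ===== PORT B =====
-- pqbEvens/pqbOdds are exact for the step-2 slices bits[0::2] / bits[1::2] of Source B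
mutual
def pqbEvens : List String → List String
  | [] => []
  | x :: t => x :: pqbOdds t
def pqbOdds : List String → List String
  | [] => []
  | _ :: t => pqbEvens t
end

def pqbNarrow (lo : Int) (hi : Int) (bits : List String) : Int × Int :=
  bits.foldl (fun p bit =>
    let mid := PySem.Int.floordiv (p.1 + p.2) 2
    if bit == "0" then (p.1, mid) else (mid, p.2)) (lo, hi)

def process_quadrant_bits_alt (height : Int) (width : Int) (size : Int) (quadrant_bits : List String) (quadrant_padding : Int) : Int × Int × Int × Int :=
  match pqbNarrow 0 height (pqbEvens quadrant_bits), pqbNarrow 0 width (pqbOdds quadrant_bits) with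
  | (row_start, row_end), (col_start, col_end) =>
    let row_end := row_end - size
    let col_end := col_end - size
    (max 0 (row_start - quadrant_padding), max 0 (col_start - quadrant_padding),
     min (height - size) (row_end + quadrant_padding), min (width - size) (col_end + quadrant_padding))

-- ===== PRECONDITION & SPEC =====
def Spec_process_quadrant_bits (height : Int) (width : Int) (size : Int) (quadrant_bits : List String) (quadrant_padding : Int) (out : Int × Int × Int × Int) : Prop := out = process_quadrant_bits_alt height width size quadrant_bits quadrant_padding
instance (height : Int) (width : Int) (size : Int) (quadrant_bits : List String) (quadrant_padding : Int) (out : Int × Int × Int × Int) : Decidable (Spec_process_quadrant_bits height width size quadrant_bits quadrant_padding out) := by unfold Spec_process_quadrant_bits; infer_instance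

-- ===== CLAIM (what is proved, stated in full; the proofs are below) =====
def Claim_equal_process_quadrant_bits : Prop := ∀ (height : Int) (width : Int) (size : Int) (quadrant_bits : List String) (quadrant_padding : Int), Dom_process_quadrant_bits height width size quadrant_bits quadrant_padding → Spec_process_quadrant_bits height width size quadrant_bits quadrant_padding (process_quadrant_bits height width size quadrant_bits quadrant_padding)

-- ===== LEMMAS AND PROOFS =====
lemma pqb_loop_eq : ∀ (l : List String) (rs re cs ce : Int),
    (∃ b, l.foldl pqbStep (true, rs, re, cs, ce)
       = (b, (pqbNarrow rs re (pqbEvens l)).1, (pqbNarrow rs re (pqbEvens l)).2,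
            (pqbNarrow cs ce (pqbOdds l)).1, (pqbNarrow cs ce (pqbOdds l)).2)) ∧
    (∃ b, l.foldl pqbStep (false, rs, re, cs, ce)
       = (b, (pqbNarrow rs re (pqbOdds l)).1, (pqbNarrow rs re (pqbOdds l)).2,
            (pqbNarrow cs ce (pqbEvens l)).1, (pqbNarrow cs ce (pqbEvens l)).2))
  | [], rs, re, cs, ce => ⟨⟨true, rfl⟩, ⟨false, rfl⟩⟩
  | x :: t, rs, re, cs, ce => by
    constructor
    · by_cases hx : x = "0"
      · simpa [List.foldl, pqbStep, pqbEvens, pqbOdds, pqbNarrow, hx] using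
          (pqb_loop_eq t rs (PySem.Int.floordiv (rs + re) 2) cs ce).2
      · simpa [List.foldl, pqbStep, pqbEvens, pqbOdds, pqbNarrow, hx] using
          (pqb_loop_eq t (PySem.Int.floordiv (rs + re) 2) re cs ce).2
    · by_cases hx : x = "0"
      · simpa [List.foldl, pqbStep, pqbEvens, pqbOdds, pqbNarrow, hx] using
          (pqb_loop_eq t rs re cs (PySem.Int.floordiv (cs + ce) 2)).1
      · simpa [List.foldl, pqbStep, pqbEvens, pqbOdds, pqbNarrow, hx] using
          (pqb_loop_eq t rs re (PySem.Int.floordiv (cs + ce) 2) ce).1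

-- ===== VERDICT (by name: the statement is the Claim_ definition above) =====
theorem process_quadrant_bits_spec : Claim_equal_process_quadrant_bits := by
  intro h w s bits p _
  unfold Spec_process_quadrant_bits process_quadrant_bits process_quadrant_bits_alt
  obtain ⟨b, hb⟩ := (pqb_loop_eq bits 0 h 0 w).1
  rw [hb]
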